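-- pv_equiv track=rewrite | github.com/Sallyrideauto/codetree-TILs | 240822/단순한 동전 챙기기/collect-coins-easy.py | solve
-- ===== SOURCE A (Python) =====
-- from collections import deque
--
-- def bfs(grid, start, n):
--     directions = [(-1, 0), (1, 0), (0, -1), (0, 1)]  # 상하좌우 이동
--     queue = deque([start])
--     distances = [[float('inf')] * n for _ in range(n)]
--     x_start, y_start = start
--     distances[x_start][y_start] = 0
--
--     while queue:
--         x, y = queue.popleft()
--         for dx, dy in directions:
--             nx, ny = x + dx, y + dy
--             if 0 <= nx < n and 0 <= ny < n and grid[nx][ny] != '#' and distances[nx][ny] == float('inf'):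
--                 distances[nx][ny] = distances[x][y] + 1
--                 queue.append((nx, ny))
--
--     return distances
--
-- def solve(grid, n):
--     points = {}
--     for i in range(n):
--         for j in range(n):
--             if grid[i][j] in 'SE' or grid[i][j].isdigit():
--                 points[grid[i][j]] = (i, j)
--
--     if 'S' not in points or 'E' not in points or len([k for k in points if k.isdigit()]) < 3:
--         return -1
--
--     dist = {p: bfs(grid, points[p], n) for p in points}
--     dp = {}
--     coin_keys = sorted(k for k in points if k.isdigit())
--     start_key = 'S'
--     end_key = 'E'
--     queue = deque()
--
--     for ck in coin_keys:
--         state = (ck, 1 << (ord(ck) - ord('1')))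
--         dp[state] = dist[start_key][points[ck][0]][points[ck][1]]
--         queue.append((ck, state[1], dp[state]))
--
--     while queue:
--         last_coin, mask, steps = queue.popleft()
--
--         for next_coin in coin_keys:
--             if next_coin > last_coin:
--                 new_mask = mask | (1 << (ord(next_coin) - ord('1')))
--                 if dist[last_coin][points[next_coin][0]][points[next_coin][1]] < float('inf'):
--                     new_steps = steps + dist[last_coin][points[next_coin][0]][points[next_coin][1]]
--                     new_state = (next_coin, new_mask)
--                     if new_state not in dp or new_steps < dp[new_state]:
--                         dp[new_state] = new_steps
--                         queue.append((next_coin, new_mask, new_steps))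
--
--     min_steps = float('inf')
--     for state in dp:
--         last_coin, mask = state
--         if bin(mask).count('1') >= 3:
--             final_steps = dp[state] + dist[last_coin][points[end_key][0]][points[end_key][1]]
--             min_steps = min(min_steps, final_steps)
--
--     return min_steps if min_steps != float('inf') else -1
-- ===== SOURCE B (Python) =====
-- from collections import deque
--
-- def bfs(grid, start, n):
--     directions = [(-1, 0), (1, 0), (0, -1), (0, 1)]
--     queue = deque([start])
--     distances = [[float('inf')] * n for _ in range(n)]
--     x_start, y_start = start
--     distances[x_start][y_start] = 0
--
--     while queue:
--         x, y = queue.popleft()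
--         for dx, dy in directions:
--             nx, ny = x + dx, y + dy
--             if 0 <= nx < n and 0 <= ny < n and grid[nx][ny] != '#' and distances[nx][ny] == float('inf'):
--                 distances[nx][ny] = distances[x][y] + 1
--                 queue.append((nx, ny))
--
--     return distances
--
-- def solve(grid, n):
--     points = {}
--     for i in range(n):
--         for j in range(n):
--             if grid[i][j] in 'SE' or grid[i][j].isdigit():
--                 points[grid[i][j]] = (i, j)
--
--     coins = sorted(k for k in points if k.isdigit())
--     if 'S' not in points or 'E' not in points or len(coins) < 3:
--         return -1
--
--     INF = float('inf')
--     dist = {p: bfs(grid, points[p], n) for p in points}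
--
--     def at(key, c):
--         # distance from key's BFS source to the cell of c
--         x, y = points[c]
--         return dist[key][x][y]
--
--     def best(j, k):
--         # min steps to collect a strictly increasing chain of k coins ending at coins[j]
--         if k == 1:
--             return at('S', coins[j])
--         return min((best(i, k - 1) + at(coins[i], coins[j]) for i in range(j)), default=INF)
--
--     m = len(coins)
--     ans = min((best(j, k) + at(coins[j], 'E') for j in range(m) for k in range(3, m + 1)),
--               default=INF)
--     return -1 if ans == INF else ans
-- ===== Notes on version B (the rewrite author's own statement) =====
-- stated objective: alternative
-- what changed: A's deque-driven relaxation over (last coin, bitmask) states with a dp dict is replaced by a direct recursion best(j, k) = min steps of a strictly increasing chain of k coins ending at the j-th coin, read off for k >= 3 plus the distance to E; the per-source BFS is kept.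
import Mathlib
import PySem

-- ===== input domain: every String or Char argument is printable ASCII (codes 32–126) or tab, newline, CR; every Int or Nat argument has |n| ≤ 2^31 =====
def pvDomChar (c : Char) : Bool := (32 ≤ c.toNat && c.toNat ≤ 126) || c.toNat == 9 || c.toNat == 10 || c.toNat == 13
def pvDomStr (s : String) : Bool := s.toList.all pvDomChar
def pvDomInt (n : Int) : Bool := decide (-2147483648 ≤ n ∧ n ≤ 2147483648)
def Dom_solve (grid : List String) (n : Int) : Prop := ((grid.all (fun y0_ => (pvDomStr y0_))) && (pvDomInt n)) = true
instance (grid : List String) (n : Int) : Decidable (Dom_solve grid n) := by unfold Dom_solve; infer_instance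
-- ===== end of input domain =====

-- B replaces A's queue-driven relaxation over (coin, bitmask) states by a direct recursion
-- over (coin index, number of coins collected); same BFS distances, same return value (alternative decomposition).


-- ===== PORT A =====
-- float('inf') is modelled by 'none : Option Int' (some k = the int k): vlt / vadd / vmin below
-- compute exactly Python's <, + and min on the values occurring here (no -inf, no inf - inf).
def vlt : Option Int → Option Int → Bool
  | some a, some b => a < b
  | some _, none => true
  | none, _ => false

def vadd : Option Int → Option Int → Option Int
  | some a, some b => some (a + b)
  | _, _ => none

-- min a b (Python's two-argument min: the second argument only when it is strictly smaller)
def vmin (a b : Option Int) : Option Int := if vlt b a then b else a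

-- grid[i][j] : Option Char (none = IndexError, those inputs are excluded by Pre_solve)
def cellC (grid : List String) (i j : Int) : Option Char :=
  (PySem.List.pyGet? grid i).bind (fun s => PySem.Str.pyGet? s j)

-- distances[i][j] read / write (indices are guarded 0 ≤ i,j < n at every use site)
def mget (m : List (List (Option Int))) (i j : Int) : Option Int :=
  PySem.List.pyGetD (PySem.List.pyGetD m i []) j none

def mset (m : List (List (Option Int))) (i j : Int) (v : Option Int) : List (List (Option Int)) :=
  PySem.List.pySetD m i (PySem.List.pySetD (PySem.List.pyGetD m i []) j v)

-- the 'while queue' of bfs; the fuel n²+1 is a totality guard only (BFS pushes each of the n² cells at most once)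
def bfsLoop (grid : List String) (n : Int) : Nat → List (List (Option Int)) → List (Int × Int) → List (List (Option Int))
  | 0, dist, _ => dist
  | _ + 1, dist, [] => dist
  | fuel + 1, dist, (x, y) :: rest =>
    let step := [((-1 : Int), (0 : Int)), (1, 0), (0, -1), (0, 1)].foldl
      (fun (acc : List (List (Option Int)) × List (Int × Int)) d =>
        let nx := x + d.1
        let ny := y + d.2
        if 0 ≤ nx ∧ nx < n ∧ 0 ≤ ny ∧ ny < n ∧ cellC grid nx ny ≠ some '#' ∧ mget acc.1 nx ny = none then
          (mset acc.1 nx ny (vadd (mget acc.1 x y) (some 1)), acc.2 ++ [(nx, ny)])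
        else acc) (dist, [])
    bfsLoop grid n fuel step.1 (rest ++ step.2)

def bfs (grid : List String) (start : Int × Int) (n : Int) : List (List (Option Int)) :=
  let distances : List (List (Option Int)) := List.replicate n.toNat (List.replicate n.toNat none)
  let distances := mset distances start.1 start.2 (some 0)
  bfsLoop grid n (n.toNat * n.toNat + 1) distances [start]

-- the points-collection double loop (identical lines in Source A and Source B, hence one shared helper)
def pointsOf (grid : List String) (n : Int) : PySem.Dict Char (Int × Int) :=
  (PySem.List.pyRange 0 n 1).foldl (fun pts i =>
    (PySem.List.pyRange 0 n 1).foldl (fun pts j =>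
      match cellC grid i j with
      | some c => if c = 'S' ∨ c = 'E' ∨ PySem.Chars.isdigit c then pts.insert c (i, j) else pts
      | none => pts) pts) PySem.Dict.empty

-- dist = {p: bfs(grid, points[p], n) for p in points}  (identical line in Source A and Source B)
def distsOf (grid : List String) (n : Int) (pts : PySem.Dict Char (Int × Int)) :
    PySem.Dict Char (List (List (Option Int))) :=
  pts.keys.foldl (fun d p => d.insert p (bfs grid (pts.getD p (0, 0)) n)) PySem.Dict.empty

-- 1 << (ord(c) - ord('1')); a negative shift ('0' coin) raises ValueError in Python — excluded by Pre_solve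
def coinBit (c : Char) : Int := if 49 ≤ c.toNat then (1 : Int) <<< (c.toNat - 49) else 0

-- the 'while queue' of A's dp relaxation; the fuel is a totality guard only
def dpLoop (cks : List Char) (wf : Char → Char → Option Int) :
    Nat → PySem.Dict (Char × Int) (Option Int) → List (Char × Int × Option Int) →
    PySem.Dict (Char × Int) (Option Int)
  | 0, dp, _ => dp
  | _ + 1, dp, [] => dp
  | fuel + 1, dp, (lastc, mask, steps) :: rest =>
    let step := cks.foldl
      (fun (acc : PySem.Dict (Char × Int) (Option Int) × List (Char × Int × Option Int)) next =>
        if lastc < next then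
          let newMask := PySem.Int.bor mask (coinBit next)
          if vlt (wf lastc next) none then
            let newSteps := vadd steps (wf lastc next)
            match acc.1.get? (next, newMask) with
            | none => (acc.1.insert (next, newMask) newSteps, acc.2 ++ [(next, newMask, newSteps)])
            | some old =>
              if vlt newSteps old then
                (acc.1.insert (next, newMask) newSteps, acc.2 ++ [(next, newMask, newSteps)])
              else acc
          else acc
        else acc) (dp, [])
    dpLoop cks wf fuel step.1 (rest ++ step.2)

def solve (grid : List String) (n : Int) : Int :=
  let pts := pointsOf grid n
  let digitKeys := pts.keys.filter (fun c => PySem.Chars.isdigit c)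
  if ¬ pts.contains 'S' ∨ ¬ pts.contains 'E' ∨ PySem.List.len digitKeys < 3 then -1
  else
    let dist := distsOf grid n pts
    let coinKeys := PySem.List.sorted digitKeys (fun c => c) false
    let ptAt := fun c => pts.getD c ((0 : Int), (0 : Int))
    let mat := fun c => dist.getD c []
    let wf := fun a b => mget (mat a) (ptAt b).1 (ptAt b).2
    let init := coinKeys.foldl
      (fun (acc : PySem.Dict (Char × Int) (Option Int) × List (Char × Int × Option Int)) ck =>
        let v := mget (mat 'S') (ptAt ck).1 (ptAt ck).2
        (acc.1.insert (ck, coinBit ck) v, acc.2 ++ [(ck, coinBit ck, v)]))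
      (PySem.Dict.empty, [])
    let dpF := dpLoop coinKeys wf (2 * 2 ^ coinKeys.length + coinKeys.length) init.1 init.2
    let eP := ptAt 'E'
    -- bin(mask).count('1') is the population count: ported as PySem.Int.bitCount (exact for the masks ≥ 0 that occur)
    let minSteps := dpF.keys.foldl
      (fun acc st =>
        if 3 ≤ PySem.Int.bitCount st.2 then vmin acc (vadd (dpF.getD st none) (mget (mat st.1) eP.1 eP.2))
        else acc) none
    minSteps.getD (-1)

-- ===== PORT B =====
-- min steps of a strictly increasing chain of k coins ending at coins[j] (Source B's recursive best(j, k))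
-- min(gen, default=inf) is ported as a fold of the two-argument vmin (same value)
def bestB (coins : List Char) (seed : Char → Option Int) (wf : Char → Char → Option Int)
    (j k : Nat) : Option Int :=
  if k = 1 then seed (coins.getD j ' ')
  else
    (((List.range j).attach.map (fun i =>
      vadd (bestB coins seed wf i.1 (k - 1)) (wf (coins.getD i.1 ' ') (coins.getD j ' ')))).foldl
      vmin none)
  termination_by j
  decreasing_by exact List.mem_range.mp i.2

def solve_alt (grid : List String) (n : Int) : Int :=
  let pts := pointsOf grid n
  let coins := PySem.List.sorted (pts.keys.filter (fun c => PySem.Chars.isdigit c)) (fun c => c) false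
  if ¬ pts.contains 'S' ∨ ¬ pts.contains 'E' ∨ PySem.List.len coins < 3 then -1
  else
    let dist := distsOf grid n pts
    let at_ := fun (key c : Char) =>
      let p := pts.getD c ((0 : Int), (0 : Int))
      mget (dist.getD key []) p.1 p.2
    let m := coins.length
    let ans := (((List.range m).flatMap (fun j =>
      (List.range' 3 (m - 2)).map (fun k =>
        vadd (bestB coins (fun c => at_ 'S' c) at_ j k) (at_ (coins.getD j ' ') 'E')))).foldl
      vmin none)
    ans.getD (-1)

-- ===== PRECONDITION & SPEC =====
-- the Option Chars of the n×n window the points loop reads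
def winChars (grid : List String) (n : Int) : List (Option Char) :=
  (PySem.List.pyRange 0 n 1).flatMap (fun i => (PySem.List.pyRange 0 n 1).map (fun j => cellC grid i j))

-- Pre_solve excludes exactly the inputs on which Python A raises: an n×n window reaching outside
-- the grid (IndexError in the points loops / BFS), and the grids whose window contains the coin '0'
-- together with 'S', 'E' and at least 3 distinct digits, where A evaluates 1 << -1 (ValueError).
def Pre_solve (grid : List String) (n : Int) : Prop :=
  (0 < n → n ≤ (grid.length : Int) ∧ ∀ s ∈ grid.take n.toNat, n ≤ PySem.Str.len s) ∧
  ¬ (some '0' ∈ winChars grid n ∧ some 'S' ∈ winChars grid n ∧ some 'E' ∈ winChars grid n ∧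
      3 ≤ (PySem.Set.ofList (((winChars grid n).filterMap id).filter (fun c => PySem.Chars.isdigit c))).length)
instance (grid : List String) (n : Int) : Decidable (Pre_solve grid n) := by
  unfold Pre_solve; infer_instance

def pvWitness_solve : List String × Int := (["S12", "3.E", "..."], 3)

def Spec_solve (grid : List String) (n : Int) (out : Int) : Prop := out = solve_alt grid n
instance (grid : List String) (n : Int) (out : Int) : Decidable (Spec_solve grid n out) := by
  unfold Spec_solve; infer_instance

-- ===== CLAIM (what is proved, stated in full; the proofs are below) =====
def Claim_equal_solve : Prop := ∀ (grid : List String) (n : Int),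
  Dom_solve grid n → Pre_solve grid n → Spec_solve grid n (solve grid n)

-- ===== LEMMAS AND PROOFS =====

/- ---------- value toolkit: Option Int ↔ WithTop Int ---------- -/

def toW : Option Int → WithTop Int
  | none => ⊤
  | some a => (a : WithTop Int)

theorem toW_inj {a b : Option Int} (h : toW a = toW b) : a = b := by
  cases a <;> cases b <;> simp [toW] at h ⊢ <;> exact_mod_cast h

theorem vlt_irrefl (a : Option Int) : vlt a a = false := by
  cases a <;> simp [vlt]

theorem toW_vadd (a b : Option Int) : toW (vadd a b) = toW a + toW b := by
  cases a <;> cases b <;> simp [vadd, toW]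

theorem toW_vmin (a b : Option Int) : toW (vmin a b) = min (toW a) (toW b) := by
  rcases a with _ | a <;> rcases b with _ | b <;>
    simp [vmin, vlt, toW, min_def] <;> split_ifs <;> simp_all <;> omega

theorem vadd_none (a : Option Int) : vadd a none = none := by cases a <;> rfl

/- ---------- lmin: fold of vmin ---------- -/

def lmin (L : List (Option Int)) : Option Int := L.foldl vmin none

theorem foldl_vmin_le (L : List (Option Int)) (a : Option Int) :
    toW (L.foldl vmin a) ≤ toW a := by
  induction L generalizing a with
  | nil => simp
  | cons x t ih =>
    calc toW ((x :: t).foldl vmin a) ≤ toW (vmin a x) := ih _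
    _ ≤ toW a := by rw [toW_vmin]; exact min_le_left _ _

theorem foldl_vmin_le_mem {L : List (Option Int)} {x : Option Int} (hx : x ∈ L)
    (a : Option Int) : toW (L.foldl vmin a) ≤ toW x := by
  induction L generalizing a with
  | nil => simp at hx
  | cons y t ih =>
    rcases List.mem_cons.mp hx with rfl | hx
    · calc toW ((x :: t).foldl vmin a) ≤ toW (vmin a x) := foldl_vmin_le _ _
      _ ≤ toW x := by rw [toW_vmin]; exact min_le_right _ _
    · exact ih hx _

theorem foldl_vmin_mem_or (L : List (Option Int)) (a : Option Int) :
    L.foldl vmin a = a ∨ L.foldl vmin a ∈ L := by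
  induction L generalizing a with
  | nil => left; rfl
  | cons x t ih =>
    rcases ih (vmin a x) with h | h
    · rw [List.foldl_cons, h]
      unfold vmin
      split_ifs with hx
      · right; exact List.mem_cons_self
      · left; rfl
    · right; exact List.mem_cons_of_mem _ h

theorem lmin_le_mem {L : List (Option Int)} {x : Option Int} (hx : x ∈ L) :
    toW (lmin L) ≤ toW x := foldl_vmin_le_mem hx none

theorem lmin_mem_or_top (L : List (Option Int)) : lmin L = none ∨ lmin L ∈ L :=
  foldl_vmin_mem_or L none

-- the one comparison tool: two candidate lists that dominate each other have the same min
theorem lmin_eq_of_dominates (L1 L2 : List (Option Int))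
    (h1 : ∀ x ∈ L1, toW x < ⊤ → ∃ y ∈ L2, toW y ≤ toW x)
    (h2 : ∀ y ∈ L2, toW y < ⊤ → ∃ x ∈ L1, toW x ≤ toW y) :
    lmin L1 = lmin L2 := by
  apply toW_inj
  apply le_antisymm
  · rcases lmin_mem_or_top L2 with h | h
    · rw [h]; exact le_top
    · by_cases htop : toW (lmin L2) < ⊤
      · obtain ⟨x, hx, hle⟩ := h2 _ h htop
        exact le_trans (lmin_le_mem hx) hle
      · simp only [not_lt, top_le_iff] at htop; rw [htop]; exact le_top
  · rcases lmin_mem_or_top L1 with h | h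
    · rw [h]; exact le_top
    · by_cases htop : toW (lmin L1) < ⊤
      · obtain ⟨y, hy, hle⟩ := h1 _ h htop
        exact le_trans (lmin_le_mem hy) hle
      · simp only [not_lt, top_le_iff] at htop; rw [htop]; exact le_top

/- ---------- chains over the sorted coin list ---------- -/

-- last element of a chain (chains are nonempty)
def lastC (l : List Char) : Char := l.getLastD ' '

def edgesC (l : List Char) : List (Char × Char) := l.zip l.tail

-- value of a chain: seed of its first coin plus the traversed pairwise distances
def valC (sd : Char → Option Int) (wv : Char → Char → Option Int) (l : List Char) : Option Int :=
  (edgesC l).foldl (fun a p => vadd a (wv p.1 p.2)) (sd (l.headD ' '))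

-- all edges finite (the only extensions A's loop follows)
def FE (wv : Char → Char → Option Int) (l : List Char) : Prop :=
  ∀ p ∈ edgesC l, vlt (wv p.1 p.2) none = true

-- a chain: nonempty, strictly increasing labels, labels among the coins
def IsChainC (cks l : List Char) : Prop :=
  l ≠ [] ∧ l.Pairwise (· < ·) ∧ ∀ c ∈ l, c ∈ cks

theorem edgesC_snoc (l : List Char) (hl : l ≠ []) (c : Char) :
    edgesC (l ++ [c]) = edgesC l ++ [(lastC l, c)] := by
  induction l with
  | nil => simp at hl
  | cons x t ih =>
    cases t with
    | nil => simp [edgesC, lastC]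
    | cons y t' =>
      have := ih (by simp)
      simp only [edgesC, lastC] at this ⊢
      simp_all [List.zip]

theorem valC_singleton (sd : Char → Option Int) (wv : Char → Char → Option Int) (c : Char) :
    valC sd wv [c] = sd c := rfl

theorem valC_snoc (sd : Char → Option Int) (wv : Char → Char → Option Int)
    (l : List Char) (hl : l ≠ []) (c : Char) :
    valC sd wv (l ++ [c]) = vadd (valC sd wv l) (wv (lastC l) c) := by
  unfold valC
  rw [edgesC_snoc l hl c, List.foldl_append]
  have : (l ++ [c]).headD ' ' = l.headD ' ' := by cases l <;> simp_all
  rw [this]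
  simp

theorem FE_snoc_iff (wv : Char → Char → Option Int) (l : List Char) (hl : l ≠ []) (c : Char) :
    FE wv (l ++ [c]) ↔ FE wv l ∧ vlt (wv (lastC l) c) none = true := by
  unfold FE
  rw [edgesC_snoc l hl c]
  simp [and_comm]
  aesop

theorem foldl_vadd_ne_none {β : Type} (L : List β) (g : β → Option Int) (a : Option Int)
    (h : L.foldl (fun a p => vadd a (g p)) a ≠ none) :
    a ≠ none ∧ ∀ p ∈ L, g p ≠ none := by
  induction L generalizing a with
  | nil => simpa using h
  | cons x t ih =>
    simp only [List.foldl_cons] at h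
    obtain ⟨h1, h2⟩ := ih _ h
    have hx : vadd a (g x) ≠ none := h1
    constructor
    · intro ha; rw [ha] at hx; exact hx rfl
    · intro p hp
      rcases List.mem_cons.mp hp with rfl | hp
      · intro hg; rw [hg, vadd_none] at hx; exact hx rfl
      · exact h2 p hp

-- a finite chain value means every edge is finite
theorem FE_of_valC_ne_none {sd : Char → Option Int} {wv : Char → Char → Option Int}
    {l : List Char} (h : valC sd wv l ≠ none) : FE wv l := by
  unfold valC at h
  obtain ⟨-, h2⟩ := foldl_vadd_ne_none _ _ _ h
  intro p hp
  have := h2 p hp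
  rcases hw : wv p.1 p.2 with _ | v
  · exact absurd hw this
  · simp [vlt]

theorem last_mem {l : List Char} (hl : l ≠ []) : lastC l ∈ l := by
  unfold lastC
  cases l with
  | nil => simp at hl
  | cons x t =>
    rw [List.getLastD_eq_getLast?, List.getLast?_eq_some_getLast (l := x :: t) (by simp)]
    exact List.getLast_mem _

theorem lastC_snoc (l : List Char) (c : Char) : lastC (l ++ [c]) = c := by
  simp [lastC]

theorem lt_of_pairwise_snoc {l : List Char} {c : Char}
    (h : (l ++ [c]).Pairwise (· < ·)) : ∀ x ∈ l, x < c := by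
  rw [List.pairwise_append] at h
  intro x hx
  exact h.2.2 x hx c (by simp)

theorem pairwise_snoc_of_last {l : List Char} {c : Char} (hl : l ≠ [])
    (h : l.Pairwise (· < ·)) (hc : lastC l < c) : (l ++ [c]).Pairwise (· < ·) := by
  rw [List.pairwise_append]
  refine ⟨h, by simp, ?_⟩
  intro x hx y hy
  simp only [List.mem_singleton] at hy
  subst hy
  -- x ≤ last l < c
  induction l using List.reverseRecOn with
  | nil => simp at hl
  | append_singleton t a _ =>
    rw [lastC_snoc] at hc
    rcases List.mem_append.mp hx with hx | hx
    · exact lt_trans (lt_of_pairwise_snoc h x hx) hc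
    · simp only [List.mem_singleton] at hx; subst hx; exact hc

-- a strictly increasing list over a strictly increasing list is a sublist
theorem sublist_of_chain : ∀ (cks l : List Char), l.Pairwise (· < ·) → (∀ c ∈ l, c ∈ cks) →
    cks.Pairwise (· < ·) → l.Sublist cks := by
  intro cks
  induction cks with
  | nil =>
    intro l _ h2 _
    cases l with
    | nil => simp
    | cons x t => exact absurd (h2 x (by simp)) (by simp)
  | cons c cks' ih =>
    intro l hl hsub hck
    cases l with
    | nil => simp
    | cons a t =>
      by_cases hac : a = c
      · subst hac
        refine List.Sublist.cons₂ _ (ih t (hl.sublist (List.sublist_cons_self _ _)) ?_ (hck.sublist (List.sublist_cons_self _ _)))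
        intro x hx
        have hmem : x ∈ a :: cks' := hsub x (List.mem_cons_of_mem _ hx)
        have hax : a < x := (List.pairwise_cons.mp hl).1 x hx
        rcases List.mem_cons.mp hmem with rfl | h
        · exact absurd hax (lt_irrefl _)
        · exact h
      · refine List.Sublist.cons _ (ih (a :: t) hl ?_ (hck.sublist (List.sublist_cons_self _ _)))
        intro x hx
        have hmem : x ∈ c :: cks' := hsub x hx
        rcases List.mem_cons.mp hmem with hxc | h
        · -- x = c ∈ a :: t is impossible: a ∈ cks', so c < a, while every element of a :: t is ≥ a
          exfalso
          subst hxc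
          have hamem : a ∈ x :: cks' := hsub a (by simp)
          rcases List.mem_cons.mp hamem with haeq | ha'
          · exact hac haeq
          · have hca : x < a := (List.pairwise_cons.mp hck).1 a ha'
            rcases List.mem_cons.mp hx with hxa | hxx
            · exact hac hxa.symm
            · have hax : a < x := (List.pairwise_cons.mp hl).1 x hxx
              exact absurd (lt_trans hca hax) (lt_irrefl _)
        · exact h

theorem nodup_length_le {α : Type} {L1 L2 : List α}
    (h1 : L1.Nodup) (hsub : L1 ⊆ L2) : L1.length ≤ L2.length :=
  List.Subperm.length_le (List.subperm_of_subset h1 hsub)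

/- ---------- bit masks of chains ---------- -/

-- bit position of a coin: ord(c) - ord('1')
def posC (c : Char) : Nat := c.toNat - 49

def maskN (l : List Char) : Nat := l.foldl (fun a c => a ||| 2 ^ posC c) 0

def sumN (l : List Char) : Nat := (l.map (fun c => 2 ^ posC c)).sum

-- the Int mask A's loop builds
def maskI (l : List Char) : Int := (maskN l : Int)

def inRange (c : Char) : Prop := '1' ≤ c ∧ c ≤ '9'

theorem posC_lt_posC {a b : Char} (ha : inRange a) (hab : a < b) : posC a < posC b := by
  obtain ⟨h1, -⟩ := ha
  have h49 : 49 ≤ a.toNat := h1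
  have : a.toNat < b.toNat := hab
  unfold posC
  omega

theorem char_eq_of_posC_eq {a b : Char} (ha : inRange a) (hb : inRange b)
    (h : posC a = posC b) : a = b := by
  obtain ⟨ha1, -⟩ := ha
  obtain ⟨hb1, -⟩ := hb
  have h49a : 49 ≤ a.toNat := ha1
  have h49b : 49 ≤ b.toNat := hb1
  have : a.toNat = b.toNat := by unfold posC at h; omega
  exact Char.eq_of_val_eq (by unfold Char.toNat at this; exact UInt32.toNat_inj.mp this)

theorem coinBit_eq {c : Char} (hc : inRange c) : coinBit c = ((2 ^ posC c : Nat) : Int) := by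
  have h49 : 49 ≤ c.toNat := hc.1
  unfold coinBit posC
  rw [if_pos h49, Int.shiftLeft_eq]
  push_cast
  ring

theorem maskN_snoc (l : List Char) (c : Char) :
    maskN (l ++ [c]) = maskN l ||| 2 ^ posC c := by
  unfold maskN; rw [List.foldl_append]; rfl

theorem sumN_snoc (l : List Char) (c : Char) :
    sumN (l ++ [c]) = sumN l + 2 ^ posC c := by
  unfold sumN; simp

theorem or_two_pow_eq_add {a p : Nat} (h : a < 2 ^ p) : a ||| 2 ^ p = a + 2 ^ p := by
  have := Nat.shiftLeft_add_eq_or_of_lt (i := p) (b := a) h 1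
  simp only [Nat.shiftLeft_eq, one_mul] at this
  rw [Nat.lor_comm] at this
  omega

-- a good chain: strictly increasing, labels in '1'..'9'
def GoodC (l : List Char) : Prop := l.Pairwise (· < ·) ∧ ∀ c ∈ l, inRange c

theorem goodC_snoc {l : List Char} {c : Char} (h : GoodC (l ++ [c])) : GoodC l :=
  ⟨h.1.sublist (by simp), fun x hx => h.2 x (by simp [hx])⟩

-- mask = sum and the sum is sandwiched by the last position's powers
theorem mask_sum_bound : ∀ (l : List Char), GoodC l → l ≠ [] →
    maskN l = sumN l ∧ 2 ^ posC (lastC l) ≤ sumN l ∧ sumN l < 2 ^ (posC (lastC l) + 1) := by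
  intro l
  induction l using List.reverseRecOn with
  | nil => intro _ h; exact absurd rfl h
  | append_singleton t c ih =>
    intro hg _
    rw [lastC_snoc, maskN_snoc, sumN_snoc]
    by_cases ht : t = []
    · subst ht
      have h1 : maskN ([] : List Char) = 0 := rfl
      have h2 : sumN ([] : List Char) = 0 := rfl
      rw [h1, h2]
      refine ⟨by simp, by simp, ?_⟩
      have h3 : 2 ^ (posC c + 1) = 2 ^ posC c * 2 := by ring
      have h4 : 0 < 2 ^ posC c := by positivity
      omega
    · obtain ⟨h1, h2, h3⟩ := ih (goodC_snoc hg) ht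
      have hlast : lastC t < c := by
        have := lt_of_pairwise_snoc hg.1 (lastC t) (last_mem ht)
        exact this
      have hpos : posC (lastC t) < posC c := posC_lt_posC (hg.2 _ (by simp [last_mem ht])) hlast
      have hsum_lt : sumN t < 2 ^ posC c := lt_of_lt_of_le h3 (Nat.pow_le_pow_right (by norm_num) hpos)
      have hor : maskN t ||| 2 ^ posC c = sumN t + 2 ^ posC c := by
        rw [h1]; exact or_two_pow_eq_add hsum_lt
      refine ⟨hor, by omega, ?_⟩
      have : 2 ^ (posC c + 1) = 2 ^ posC c + 2 ^ posC c := by ring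
      omega

-- popcount of a mask with one extra high bit
theorem bitCount_add_two_pow : ∀ (p a : Nat), a < 2 ^ p →
    PySem.Int.bitCount ((a + 2 ^ p : Nat) : Int) = PySem.Int.bitCount (a : Int) + 1 := by
  intro p
  induction p with
  | zero =>
    intro a ha
    interval_cases a
    decide
  | succ p ih =>
    intro a ha
    have hpos : 0 < a + 2 ^ (p + 1) := by positivity
    rw [PySem.Int.bitCount_natCast hpos]
    have hdiv : (a + 2 ^ (p + 1)) / 2 = a / 2 + 2 ^ p := by
      rcases Nat.even_or_odd a with ⟨b, hb⟩ | ⟨b, hb⟩ <;> subst hb <;> ring_nf <;> omega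
    have hmod : (a + 2 ^ (p + 1)) % 2 = a % 2 := by
      have : 2 ^ (p + 1) = 2 * 2 ^ p := by ring
      omega
    rw [hdiv, hmod]
    have hhalf : a / 2 < 2 ^ p := by
      have : 2 ^ (p + 1) = 2 * 2 ^ p := by ring
      omega
    rw [ih _ hhalf]
    by_cases ha0 : a = 0
    · subst ha0; simp
    · rw [PySem.Int.bitCount_natCast (by omega : 0 < a)]
      omega

theorem bitCount_maskI : ∀ (l : List Char), GoodC l →
    PySem.Int.bitCount (maskI l) = l.length := by
  intro l
  induction l using List.reverseRecOn with
  | nil => intro _; decide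
  | append_singleton t c ih =>
    intro hg
    unfold maskI
    rw [maskN_snoc]
    by_cases ht : t = []
    · subst ht
      simp only [maskN, List.foldl_nil, Nat.zero_or, List.length_nil, List.nil_append,
        List.length_cons]
      have : (0 : Nat) < 2 ^ posC c := by positivity
      have h := bitCount_add_two_pow (posC c) 0 (by positivity)
      simpa using h
    · obtain ⟨h1, h2, h3⟩ := mask_sum_bound t (goodC_snoc hg) ht
      have hlast : lastC t < c := lt_of_pairwise_snoc hg.1 (lastC t) (last_mem ht)
      have hpos : posC (lastC t) < posC c := posC_lt_posC (hg.2 _ (by simp [last_mem ht])) hlast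
      have hsum_lt : maskN t < 2 ^ posC c := by
        rw [h1]; exact lt_of_lt_of_le h3 (Nat.pow_le_pow_right (by norm_num) hpos)
      rw [or_two_pow_eq_add hsum_lt, bitCount_add_two_pow _ _ hsum_lt]
      have := ih (goodC_snoc hg)
      unfold maskI at this
      rw [this]
      simp

-- the mask determines the chain
theorem chain_eq_of_maskN_eq : ∀ (l1 l2 : List Char), GoodC l1 → GoodC l2 →
    maskN l1 = maskN l2 → l1 = l2 := by
  intro l1
  induction l1 using List.reverseRecOn with
  | nil =>
    intro l2 _ hg2 h
    rcases List.eq_nil_or_concat l2 with rfl | ⟨t2, c2, rfl⟩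
    · rfl
    · rw [List.concat_eq_append] at hg2 h ⊢
      exfalso
      obtain ⟨m1, m2, -⟩ := mask_sum_bound _ hg2 (by simp)
      have h0 : maskN ([] : List Char) = 0 := rfl
      rw [h0, m1] at h
      have : (0:Nat) < 2 ^ posC (lastC (t2 ++ [c2])) := by positivity
      omega
  | append_singleton t1 c1 ih =>
    intro l2 hg1 hg2 h
    rcases List.eq_nil_or_concat l2 with rfl | ⟨t2, c2, rfl⟩
    · exfalso
      obtain ⟨m1, m2, -⟩ := mask_sum_bound _ hg1 (by simp)
      have h0 : maskN ([] : List Char) = 0 := rfl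
      rw [h0, m1] at h
      have : (0:Nat) < 2 ^ posC (lastC (t1 ++ [c1])) := by positivity
      omega
    · rw [List.concat_eq_append] at hg2 h ⊢
      obtain ⟨m1a, m1b, m1c⟩ := mask_sum_bound _ hg1 (by simp)
      obtain ⟨m2a, m2b, m2c⟩ := mask_sum_bound _ hg2 (by simp)
      rw [m1a, m2a] at h
      rw [lastC_snoc] at m1b m1c
      rw [lastC_snoc] at m2b m2c
      have hpeq : posC c1 = posC c2 := by
        rcases lt_trichotomy (posC c1) (posC c2) with hlt | heq | hgt
        · exfalso
          have : 2 ^ (posC c1 + 1) ≤ 2 ^ posC c2 := Nat.pow_le_pow_right (by norm_num) hlt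
          omega
        · exact heq
        · exfalso
          have : 2 ^ (posC c2 + 1) ≤ 2 ^ posC c1 := Nat.pow_le_pow_right (by norm_num) hgt
          omega
      have hceq : c1 = c2 :=
        char_eq_of_posC_eq (hg1.2 c1 (by simp)) (hg2.2 c2 (by simp)) hpeq
      subst hceq
      have hs1 := sumN_snoc t1 c1
      have hs2 := sumN_snoc t2 c1
      have hsum : sumN t1 = sumN t2 := by omega
      have hmask : maskN t1 = maskN t2 := by
        by_cases ht1 : t1 = []
        · by_cases ht2 : t2 = []
          · rw [ht1, ht2]
          · exfalso
            obtain ⟨n1, n2, -⟩ := mask_sum_bound t2 (goodC_snoc hg2) ht2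
            rw [ht1] at hsum
            have h2 : sumN ([] : List Char) = 0 := rfl
            rw [h2] at hsum
            have : (0:Nat) < 2 ^ posC (lastC t2) := by positivity
            omega
        · by_cases ht2 : t2 = []
          · exfalso
            obtain ⟨n1, n2, -⟩ := mask_sum_bound t1 (goodC_snoc hg1) ht1
            rw [ht2] at hsum
            have h2 : sumN ([] : List Char) = 0 := rfl
            rw [h2] at hsum
            have : (0:Nat) < 2 ^ posC (lastC t1) := by positivity
            omega
          · rw [(mask_sum_bound t1 (goodC_snoc hg1) ht1).1,
              (mask_sum_bound t2 (goodC_snoc hg2) ht2).1, hsum]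
      rw [ih t2 (goodC_snoc hg1) (goodC_snoc hg2) hmask]

/- ---------- B side: enumerating the chains behind bestB ---------- -/

def chainsE (coins : List Char) : Nat → Nat → List (List Char)
  | _, 0 => []
  | j, 1 => [[coins.getD j ' ']]
  | j, k + 2 =>
    (List.range j).flatMap (fun i => (chainsE coins i (k + 1)).map (fun l => l ++ [coins.getD j ' ']))

theorem getD_lt_getD {coins : List Char} (hck : coins.Pairwise (· < ·))
    {i j : Nat} (hi : i < coins.length) (hj : j < coins.length) (hij : i < j) :
    coins.getD i ' ' < coins.getD j ' ' := by
  rw [List.getD_eq_getElem _ _ hi, List.getD_eq_getElem _ _ hj]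
  exact List.pairwise_iff_getElem.mp hck i j hi hj hij

-- soundness of the enumeration: members are chains of length k ending at coins[j]
theorem chainsE_sound {coins : List Char} (hck : coins.Pairwise (· < ·)) :
    ∀ (k j : Nat), j < coins.length → ∀ l ∈ chainsE coins j k,
      l ≠ [] ∧ l.Pairwise (· < ·) ∧ (∀ c ∈ l, c ∈ coins) ∧ l.length = k ∧
        lastC l = coins.getD j ' ' := by
  intro k
  induction k with
  | zero => intro j _ l hl; simp [chainsE] at hl
  | succ k ihk =>
    intro j hj l hl
    match k, hl with
    | 0, hl =>
      simp only [chainsE, List.mem_singleton] at hl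
      subst hl
      refine ⟨by simp, by simp, ?_, by simp, by simp [lastC]⟩
      intro c hc
      simp only [List.mem_singleton] at hc
      subst hc
      rw [List.getD_eq_getElem _ _ hj]; exact List.getElem_mem hj
    | k + 1, hl =>
      simp only [chainsE, List.mem_flatMap, List.mem_map, List.mem_range] at hl
      obtain ⟨i, hij, l', hl', rfl⟩ := hl
      obtain ⟨hne, hpw, hmem, hlen, hlast⟩ := ihk i (lt_trans hij hj) l' hl'
      have hlt : lastC l' < coins.getD j ' ' := by
        rw [hlast]; exact getD_lt_getD hck (lt_trans hij hj) hj hij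
      refine ⟨by simp, pairwise_snoc_of_last hne hpw hlt, ?_, by simp [hlen], lastC_snoc _ _⟩
      intro c hc
      rcases List.mem_append.mp hc with hc | hc
      · exact hmem c hc
      · simp only [List.mem_singleton] at hc; subst hc
        rw [List.getD_eq_getElem _ _ hj]; exact List.getElem_mem hj

-- completeness: every chain is enumerated at the index of its last coin
theorem chainsE_complete {coins : List Char} (hck : coins.Pairwise (· < ·)) :
    ∀ (l : List Char), l ≠ [] → l.Pairwise (· < ·) → (∀ c ∈ l, c ∈ coins) →
      ∃ j < coins.length, coins.getD j ' ' = lastC l ∧ l ∈ chainsE coins j l.length := by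
  intro l
  induction l using List.reverseRecOn with
  | nil => intro h; exact absurd rfl h
  | append_singleton t c ih =>
    intro _ hpw hmem
    obtain ⟨j, hj, hcj⟩ := List.getElem_of_mem (hmem c (by simp))
    by_cases ht : t = []
    · subst ht
      have hgd : coins.getD j ' ' = c := by rw [List.getD_eq_getElem _ _ hj, hcj]
      refine ⟨j, hj, ?_, ?_⟩
      · rw [hgd]; simp [lastC]
      · simp only [List.nil_append, List.length_cons, List.length_nil]
        have : chainsE coins j 1 = [[coins.getD j ' ']] := rfl
        rw [this, hgd]
        simp
    · obtain ⟨i, hi, hci, hmemE⟩ := ih ht (hpw.sublist (by simp))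
        (fun x hx => hmem x (by simp [hx]))
      have hlt : coins.getD i ' ' < coins.getD j ' ' := by
        rw [hci, List.getD_eq_getElem _ _ hj, hcj]
        exact lt_of_pairwise_snoc hpw _ (last_mem ht)
      have hij : i < j := by
        rcases lt_trichotomy i j with h | h | h
        · exact h
        · exfalso; rw [h] at hlt; exact lt_irrefl _ hlt
        · exfalso; exact absurd (getD_lt_getD hck hj hi h) (lt_asymm hlt)
      refine ⟨j, hj, ?_, ?_⟩
      · rw [List.getD_eq_getElem _ _ hj, hcj, lastC_snoc]
      · have hlen : t.length + 1 = (t ++ [c]).length := by simp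
        have hlen2 : 1 ≤ t.length := by
          cases t with
          | nil => exact absurd rfl ht
          | cons _ _ => simp
        obtain ⟨k, hk⟩ : ∃ k, t.length = k + 1 := ⟨t.length - 1, by omega⟩
        rw [← hlen, hk]
        simp only [chainsE, List.mem_flatMap, List.mem_map, List.mem_range]
        refine ⟨i, hij, t, by rw [← hk]; exact hmemE, ?_⟩
        rw [List.getD_eq_getElem _ _ hj, hcj]

-- bestB computes the min chain value over the enumerated chains
theorem bestB_spec (coins : List Char) (sd : Char → Option Int)
    (wv : Char → Char → Option Int) (hck : coins.Pairwise (· < ·)) :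
    ∀ (k : Nat), 1 ≤ k → ∀ (j : Nat), j < coins.length →
      bestB coins sd wv j k = lmin ((chainsE coins j k).map (valC sd wv)) := by
  intro k
  induction k with
  | zero => intro h; omega
  | succ k ihk =>
    intro _ j hj
    match k with
    | 0 =>
      rw [bestB]
      rw [if_pos rfl]
      have : chainsE coins j 1 = [[coins.getD j ' ']] := rfl
      rw [this]
      simp only [List.map_cons, List.map_nil, valC_singleton]
      unfold lmin
      simp only [List.foldl_cons, List.foldl_nil]
      unfold vmin
      cases sd (coins.getD j ' ') <;> simp [vlt]
    | k + 1 =>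
      rw [bestB]
      rw [if_neg (by omega)]
      have hmap : ((List.range j).attach.map (fun i =>
          vadd (bestB coins sd wv i.1 (k + 1 + 1 - 1)) (wv (coins.getD i.1 ' ') (coins.getD j ' '))))
          = (List.range j).map (fun i =>
          vadd (bestB coins sd wv i (k + 1)) (wv (coins.getD i ' ') (coins.getD j ' '))) := by
        simp only [Nat.add_sub_cancel]
        exact List.attach_map_val (l := List.range j)
          (f := fun i => vadd (bestB coins sd wv i (k + 1)) (wv (coins.getD i ' ') (coins.getD j ' ')))
      rw [hmap]
      apply lmin_eq_of_dominates
      · -- every candidate vadd (bestB i (k+1)) w dominates some enumerated chain value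
        intro x hx hxfin
        simp only [List.mem_map, List.mem_range] at hx
        obtain ⟨i, hilt, rfl⟩ := hx
        have hb := ihk (by omega) i (lt_trans hilt hj)
        rw [hb] at hxfin ⊢
        have hlm : lmin ((chainsE coins i (k + 1)).map (valC sd wv)) ≠ none := by
          intro hnone
          rw [hnone] at hxfin
          simp [vadd, toW] at hxfin
        rcases lmin_mem_or_top ((chainsE coins i (k + 1)).map (valC sd wv)) with h | h
        · exact absurd h hlm
        · simp only [List.mem_map] at h
          obtain ⟨l, hl, hval⟩ := h
          obtain ⟨hne, -, -, -, hlast⟩ := chainsE_sound hck (k + 1) i (lt_trans hilt hj) l hl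
          refine ⟨valC sd wv (l ++ [coins.getD j ' ']), ?_, ?_⟩
          · apply List.mem_map.mpr
            refine ⟨l ++ [coins.getD j ' '], ?_, rfl⟩
            show _ ∈ chainsE coins j (k + 1 + 1)
            simp only [chainsE, List.mem_flatMap, List.mem_range]
            exact ⟨i, hilt, List.mem_map.mpr ⟨l, hl, rfl⟩⟩
          · rw [valC_snoc _ _ _ hne, hval, hlast]
      · -- every enumerated chain value is dominated by its candidate
        intro y hy hyfin
        simp only [List.mem_map] at hy
        obtain ⟨l', hl', rfl⟩ := hy
        simp only [chainsE, List.mem_flatMap, List.mem_map, List.mem_range] at hl'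
        obtain ⟨i, hilt, l, hl, rfl⟩ := hl'
        obtain ⟨hne, -, -, -, hlast⟩ := chainsE_sound hck (k + 1) i (lt_trans hilt hj) l hl
        refine ⟨vadd (bestB coins sd wv i (k + 1)) (wv (coins.getD i ' ') (coins.getD j ' ')), ?_, ?_⟩
        · simp only [List.mem_map, List.mem_range]
          exact ⟨i, hilt, rfl⟩
        · rw [valC_snoc _ _ _ hne, hlast]
          rw [toW_vadd, toW_vadd]
          have hb := ihk (by omega) i (lt_trans hilt hj)
          rw [hb]
          exact add_le_add (lmin_le_mem (List.mem_map.mpr ⟨l, hl, rfl⟩)) le_rfl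

/- ---------- A side: the queue-driven dp loop computes exactly the finite-edge chains ---------- -/

def stC (l : List Char) : Char × Int := (lastC l, maskI l)

def itemOfC (sd : Char → Option Int) (wv : Char → Char → Option Int) (l : List Char) :
    (Char × Int) × Option Int := (stC l, valC sd wv l)

def entryOfC (sd : Char → Option Int) (wv : Char → Char → Option Int) (l : List Char) :
    Char × Int × Option Int := (lastC l, maskI l, valC sd wv l)

-- the inner loop body of dpLoop, named for the proofs (definitionally the port's lambda)
def stepB (cks : List Char) (wv : Char → Char → Option Int) (lastc : Char) (mask : Int)
    (steps : Option Int)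
    (acc : PySem.Dict (Char × Int) (Option Int) × List (Char × Int × Option Int)) (next : Char) :
    PySem.Dict (Char × Int) (Option Int) × List (Char × Int × Option Int) :=
  if lastc < next then
    let newMask := PySem.Int.bor mask (coinBit next)
    if vlt (wv lastc next) none then
      let newSteps := vadd steps (wv lastc next)
      match acc.1.get? (next, newMask) with
      | none => (acc.1.insert (next, newMask) newSteps, acc.2 ++ [(next, newMask, newSteps)])
      | some old =>
        if vlt newSteps old then
          (acc.1.insert (next, newMask) newSteps, acc.2 ++ [(next, newMask, newSteps)])
        else acc
    else acc
  else acc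

theorem dpLoop_cons (cks : List Char) (wv : Char → Char → Option Int) (fuel : Nat)
    (dp : PySem.Dict (Char × Int) (Option Int)) (lc : Char) (mk : Int) (st : Option Int)
    (rest : List (Char × Int × Option Int)) :
    dpLoop cks wv (fuel + 1) dp ((lc, mk, st) :: rest)
      = dpLoop cks wv fuel (cks.foldl (stepB cks wv lc mk st) (dp, [])).1
          (rest ++ (cks.foldl (stepB cks wv lc mk st) (dp, [])).2) := by
  rw [dpLoop]
  rfl

theorem dpLoop_nil (cks : List Char) (wv : Char → Char → Option Int) (fuel : Nat)
    (dp : PySem.Dict (Char × Int) (Option Int)) :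
    dpLoop cks wv fuel dp [] = dp := by
  cases fuel <;> rw [dpLoop]

theorem dpLoop_zero (cks : List Char) (wv : Char → Char → Option Int)
    (dp : PySem.Dict (Char × Int) (Option Int)) (q : List (Char × Int × Option Int)) :
    dpLoop cks wv 0 dp q = dp := by
  rw [dpLoop]

theorem bor_maskI {c : Char} (hc : inRange c) (l : List Char) :
    PySem.Int.bor (maskI l) (coinBit c) = maskI (l ++ [c]) := by
  rw [coinBit_eq hc]
  unfold maskI
  rw [PySem.Int.bor_natCast, maskN_snoc]

theorem goodC_of {cks : List Char} (hrg : ∀ c ∈ cks, inRange c) {l : List Char}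
    (h : IsChainC cks l) : GoodC l := ⟨h.2.1, fun c hc => hrg c (h.2.2 c hc)⟩

theorem st_inj {cks : List Char} (hrg : ∀ c ∈ cks, inRange c) {l1 l2 : List Char}
    (h1 : IsChainC cks l1) (h2 : IsChainC cks l2) (h : stC l1 = stC l2) : l1 = l2 := by
  have hm : maskI l1 = maskI l2 := congrArg Prod.snd h
  unfold maskI at hm
  exact chain_eq_of_maskN_eq l1 l2 (goodC_of hrg h1) (goodC_of hrg h2) (by exact_mod_cast hm)

theorem chainC_snoc {cks : List Char} {l : List Char} {c : Char} (hl : IsChainC cks l)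
    (hc : c ∈ cks) (hlt : lastC l < c) : IsChainC cks (l ++ [c]) :=
  ⟨by simp, pairwise_snoc_of_last hl.1 hl.2.1 hlt,
    fun x hx => by
      rcases List.mem_append.mp hx with hx | hx
      · exact hl.2.2 x hx
      · simp only [List.mem_singleton] at hx; subst hx; exact hc⟩

-- dict-representation helpers
theorem repr_keys {sd : Char → Option Int} {wv : Char → Char → Option Int}
    {S : List (List Char)} {dp : PySem.Dict (Char × Int) (Option Int)}
    (h : dp.items = S.map (itemOfC sd wv)) : dp.keys = S.map stC := by
  show dp.items.map Prod.fst = _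
  rw [h, List.map_map]
  rfl

theorem repr_keys_nodup {cks : List Char} (hrg : ∀ c ∈ cks, inRange c)
    {S : List (List Char)} (hnd : S.Nodup) (hch : ∀ l ∈ S, IsChainC cks l) :
    (S.map stC).Nodup :=
  hnd.map_on (fun x hx y hy hxy => st_inj hrg (hch x hx) (hch y hy) hxy)

theorem repr_get_mem {cks : List Char} (hrg : ∀ c ∈ cks, inRange c)
    {sd : Char → Option Int} {wv : Char → Char → Option Int}
    {S : List (List Char)} {dp : PySem.Dict (Char × Int) (Option Int)}
    (h : dp.items = S.map (itemOfC sd wv)) (hnd : S.Nodup) (hch : ∀ l ∈ S, IsChainC cks l)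
    {l : List Char} (hl : l ∈ S) : dp.get? (stC l) = some (valC sd wv l) := by
  apply PySem.Dict.get?_of_mem_items
  · rw [h]; exact List.mem_map.mpr ⟨l, hl, rfl⟩
  · rw [repr_keys h]; exact repr_keys_nodup hrg hnd hch

theorem repr_getD_mem {cks : List Char} (hrg : ∀ c ∈ cks, inRange c)
    {sd : Char → Option Int} {wv : Char → Char → Option Int}
    {S : List (List Char)} {dp : PySem.Dict (Char × Int) (Option Int)}
    (h : dp.items = S.map (itemOfC sd wv)) (hnd : S.Nodup) (hch : ∀ l ∈ S, IsChainC cks l)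
    {l : List Char} (hl : l ∈ S) (d0 : Option Int) : dp.getD (stC l) d0 = valC sd wv l := by
  apply PySem.Dict.getD_of_mem_items
  · rw [h]; exact List.mem_map.mpr ⟨l, hl, rfl⟩
  · rw [repr_keys h]; exact repr_keys_nodup hrg hnd hch

theorem repr_get_none {sd : Char → Option Int} {wv : Char → Char → Option Int}
    {S : List (List Char)} {dp : PySem.Dict (Char × Int) (Option Int)}
    (h : dp.items = S.map (itemOfC sd wv))
    {k : Char × Int} (hk : ∀ l ∈ S, stC l ≠ k) : dp.get? k = none := by
  rw [PySem.Dict.get?_eq_none_iff_not_mem_keys, repr_keys h]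
  intro hmem
  obtain ⟨l, hl, hst⟩ := List.mem_map.mp hmem
  exact hk l hl hst

-- the chains a single pop of l0 appends (those extensions not yet discovered)
def extsL (wv : Char → Char → Option Int) (S : List (List Char)) (l0 : List Char)
    (cs : List Char) : List (List Char) :=
  (cs.filter (fun c => decide (lastC l0 < c) && vlt (wv (lastC l0) c) none &&
      !decide ((l0 ++ [c]) ∈ S))).map (fun c => l0 ++ [c])

theorem extsL_congr (wv : Char → Char → Option Int) {S S' : List (List Char)} (l0 : List Char)
    (cs : List Char) (h : ∀ c ∈ cs, ((l0 ++ [c]) ∈ S') ↔ ((l0 ++ [c]) ∈ S)) :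
    extsL wv S' l0 cs = extsL wv S l0 cs := by
  unfold extsL
  congr 1
  apply List.filter_congr
  intro c hc
  simp [h c hc]

theorem extsL_spec (wv : Char → Char → Option Int) (S : List (List Char)) (l0 : List Char)
    (cs : List Char) {l : List Char} (hl : l ∈ extsL wv S l0 cs) :
    ∃ c ∈ cs, l = l0 ++ [c] ∧ lastC l0 < c ∧ vlt (wv (lastC l0) c) none = true ∧ (l0 ++ [c]) ∉ S := by
  unfold extsL at hl
  obtain ⟨c, hc, rfl⟩ := List.mem_map.mp hl
  have := List.mem_filter.mp hc
  simp only [Bool.and_eq_true, decide_eq_true_eq, Bool.not_eq_true', decide_eq_false_iff_not] at this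
  exact ⟨c, this.1, rfl, this.2.1.1, this.2.1.2, this.2.2⟩

theorem extsL_nodup (wv : Char → Char → Option Int) (S : List (List Char)) (l0 : List Char)
    {cs : List Char} (hnd : cs.Nodup) : (extsL wv S l0 cs).Nodup :=
  ((hnd.filter _).map_on (fun x _ y _ h => by simpa using h))

theorem extsL_complete (wv : Char → Char → Option Int) (S : List (List Char)) (l0 : List Char)
    (cs : List Char) {c : Char} (hc : c ∈ cs) (h1 : lastC l0 < c)
    (h2 : vlt (wv (lastC l0) c) none = true) (h3 : (l0 ++ [c]) ∉ S) :
    (l0 ++ [c]) ∈ extsL wv S l0 cs := by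
  unfold extsL
  apply List.mem_map.mpr
  refine ⟨c, List.mem_filter.mpr ⟨hc, ?_⟩, rfl⟩
  simp [h1, h2, h3]

-- one pop: the fold over the coin labels adds exactly the undiscovered extensions of l0
theorem fold_step {cks : List Char} {wv : Char → Char → Option Int} {sd : Char → Option Int}
    (hrg : ∀ c ∈ cks, inRange c)
    {l0 : List Char} (hch0 : IsChainC cks l0) :
    ∀ (cs : List Char), (∀ c ∈ cs, c ∈ cks) → cs.Nodup →
    ∀ (S : List (List Char)) (dp : PySem.Dict (Char × Int) (Option Int))
      (acc : List (Char × Int × Option Int)),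
      dp.items = S.map (itemOfC sd wv) → S.Nodup → (∀ l ∈ S, IsChainC cks l) →
      (cs.foldl (stepB cks wv (lastC l0) (maskI l0) (valC sd wv l0)) (dp, acc)).1.items
          = (S ++ extsL wv S l0 cs).map (itemOfC sd wv)
        ∧ (cs.foldl (stepB cks wv (lastC l0) (maskI l0) (valC sd wv l0)) (dp, acc)).2
          = acc ++ (extsL wv S l0 cs).map (entryOfC sd wv) := by
  intro cs
  induction cs with
  | nil =>
    intro _ _ S dp acc hrep _ _
    simp [extsL, hrep]
  | cons c cs' ih =>
    intro hsub hnd S dp acc hrep hSnd hSch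
    have hcin : c ∈ cks := hsub c (by simp)
    have hcrange : inRange c := hrg c hcin
    rw [List.foldl_cons]
    by_cases hlt : lastC l0 < c
    · by_cases hv : vlt (wv (lastC l0) c) none = true
      · -- a real candidate edge
        have hkey : (c, PySem.Int.bor (maskI l0) (coinBit c)) = stC (l0 ++ [c]) := by
          unfold stC
          rw [bor_maskI hcrange, lastC_snoc]
        have hchain : IsChainC cks (l0 ++ [c]) := chainC_snoc hch0 hcin hlt
        have hsteps : vadd (valC sd wv l0) (wv (lastC l0) c) = valC sd wv (l0 ++ [c]) :=
          (valC_snoc sd wv l0 hch0.1 c).symm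
        by_cases hmem : (l0 ++ [c]) ∈ S
        · -- already discovered: the candidate equals the stored value, nothing changes
          have hget : dp.get? (c, PySem.Int.bor (maskI l0) (coinBit c))
              = some (valC sd wv (l0 ++ [c])) := by
            rw [hkey]; exact repr_get_mem hrg hrep hSnd hSch hmem
          have hstep : stepB cks wv (lastC l0) (maskI l0) (valC sd wv l0) (dp, acc) c
              = (dp, acc) := by
            unfold stepB
            rw [if_pos hlt, if_pos hv]
            simp only [hget, hsteps, vlt_irrefl]
            rfl
          rw [hstep]
          have hfilter : extsL wv S l0 (c :: cs') = extsL wv S l0 cs' := by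
            unfold extsL
            rw [List.filter_cons]
            simp [hmem]
          rw [hfilter]
          exact ih (fun x hx => hsub x (by simp [hx])) (hnd.sublist (by simp)) S dp acc hrep hSnd hSch
        · -- new state: insert it and push it
          have hget : dp.get? (c, PySem.Int.bor (maskI l0) (coinBit c)) = none := by
            rw [hkey]
            apply repr_get_none hrep
            intro l hl hst
            exact hmem (st_inj hrg (hSch l hl) hchain hst ▸ hl)
          have hget2 : dp.get? (stC (l0 ++ [c])) = none := by rw [← hkey]; exact hget
          have hstep : stepB cks wv (lastC l0) (maskI l0) (valC sd wv l0) (dp, acc) c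
              = (dp.insert (stC (l0 ++ [c])) (valC sd wv (l0 ++ [c])),
                  acc ++ [entryOfC sd wv (l0 ++ [c])]) := by
            unfold stepB
            rw [if_pos hlt, if_pos hv]
            simp only [hkey, hget2, hsteps]
            unfold entryOfC
            rw [lastC_snoc, ← bor_maskI hcrange]
          rw [hstep]
          have hfresh : dp.contains (stC (l0 ++ [c])) = false :=
            (PySem.Dict.get?_eq_none_iff_contains dp _).mp hget2
          have hitems : (dp.insert (stC (l0 ++ [c])) (valC sd wv (l0 ++ [c]))).items
              = (S ++ [l0 ++ [c]]).map (itemOfC sd wv) := by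
            rw [PySem.Dict.items_insert_of_not_contains _ _ hfresh, hrep]
            rw [List.map_append]
            rfl
          have hS'nd : (S ++ [l0 ++ [c]]).Nodup := by
            rw [List.nodup_append]
            refine ⟨hSnd, List.nodup_singleton _, ?_⟩
            intro a ha b hb
            simp only [List.mem_singleton] at hb
            subst hb
            intro hab
            exact hmem (hab ▸ ha)
          have hS'ch : ∀ l ∈ S ++ [l0 ++ [c]], IsChainC cks l := by
            intro l hl
            rcases List.mem_append.mp hl with hl | hl
            · exact hSch l hl
            · simp only [List.mem_singleton] at hl; subst hl; exact hchain
          obtain ⟨ih1, ih2⟩ := ih (fun x hx => hsub x (by simp [hx])) (hnd.sublist (by simp))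
            (S ++ [l0 ++ [c]]) _ _ hitems hS'nd hS'ch
          have hcongr : extsL wv (S ++ [l0 ++ [c]]) l0 cs' = extsL wv S l0 cs' := by
            apply extsL_congr
            intro c' hc'
            have hne : c' ≠ c := by
              intro hcc; subst hcc
              exact (List.nodup_cons.mp hnd).1 hc'
            simp only [List.mem_append, List.mem_singleton, List.append_cancel_left_eq,
              List.cons.injEq, and_true]
            constructor
            · intro hor
              rcases hor with h | h
              · exact h
              · exact absurd (by simpa using h) hne
            · intro h; exact Or.inl h
          have hexts : extsL wv S l0 (c :: cs') = (l0 ++ [c]) :: extsL wv S l0 cs' := by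
            unfold extsL
            rw [List.filter_cons]
            simp [hlt, hv, hmem]
          rw [hcongr] at ih1 ih2
          constructor
          · rw [ih1, hexts]
            simp
          · rw [ih2, hexts]
            simp
      · -- infinite edge: skipped
        have hv' : vlt (wv (lastC l0) c) none = false := by
          rcases hb : vlt (wv (lastC l0) c) none with _ | _
          · rfl
          · exact absurd hb hv
        have hstep : stepB cks wv (lastC l0) (maskI l0) (valC sd wv l0) (dp, acc) c = (dp, acc) := by
          unfold stepB
          rw [if_pos hlt]
          simp [hv']
        rw [hstep]
        have hfilter : extsL wv S l0 (c :: cs') = extsL wv S l0 cs' := by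
          unfold extsL
          rw [List.filter_cons]
          simp [hv']
        rw [hfilter]
        exact ih (fun x hx => hsub x (by simp [hx])) (hnd.sublist (by simp)) S dp acc hrep hSnd hSch
    · -- not a larger coin: skipped
      have hstep : stepB cks wv (lastC l0) (maskI l0) (valC sd wv l0) (dp, acc) c = (dp, acc) := by
        unfold stepB
        rw [if_neg hlt]
      rw [hstep]
      have hfilter : extsL wv S l0 (c :: cs') = extsL wv S l0 cs' := by
        unfold extsL
        rw [List.filter_cons]
        simp [hlt]
      rw [hfilter]
      exact ih (fun x hx => hsub x (by simp [hx])) (hnd.sublist (by simp)) S dp acc hrep hSnd hSch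

-- the discovered set is closed under finite-edge extension
def ClosedS (cks : List Char) (wv : Char → Char → Option Int) (S : List (List Char)) : Prop :=
  ∀ l ∈ S, ∀ c ∈ cks, lastC l < c → vlt (wv (lastC l) c) none = true → (l ++ [c]) ∈ S

theorem chain_sublist {cks l : List Char} (hck : cks.Pairwise (· < ·))
    (h : IsChainC cks l) : l.Sublist cks :=
  sublist_of_chain cks l h.2.1 h.2.2 hck

theorem chains_card_le {cks : List Char} (hck : cks.Pairwise (· < ·))
    {S : List (List Char)} (hnd : S.Nodup) (hch : ∀ l ∈ S, IsChainC cks l) :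
    S.length ≤ 2 ^ cks.length := by
  have hsub : S ⊆ cks.sublists := by
    intro l hl
    exact List.mem_sublists.mpr (chain_sublist hck (hch l hl))
  calc S.length ≤ cks.sublists.length := nodup_length_le hnd hsub
  _ = 2 ^ cks.length := List.length_sublists cks

theorem dpLoop_spec {cks : List Char} {wv : Char → Char → Option Int} {sd : Char → Option Int}
    (hck : cks.Pairwise (· < ·)) (hrg : ∀ c ∈ cks, inRange c) :
    ∀ (fuel : Nat) (S Q : List (List Char)) (dp : PySem.Dict (Char × Int) (Option Int))
      (q : List (Char × Int × Option Int)),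
      dp.items = S.map (itemOfC sd wv) → S.Nodup → (∀ l ∈ S, IsChainC cks l ∧ FE wv l) →
      q = Q.map (entryOfC sd wv) → Q.Nodup → (∀ l ∈ Q, l ∈ S) →
      (∀ l ∈ S, l ∉ Q → ∀ c ∈ cks, lastC l < c → vlt (wv (lastC l) c) none = true →
        (l ++ [c]) ∈ S) →
      2 * (2 ^ cks.length - S.length) + q.length ≤ fuel →
      ∃ S', (dpLoop cks wv fuel dp q).items = S'.map (itemOfC sd wv) ∧ S'.Nodup ∧
        (∀ l ∈ S', IsChainC cks l ∧ FE wv l) ∧ (∀ l ∈ S, l ∈ S') ∧ ClosedS cks wv S' := by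
  intro fuel
  induction fuel with
  | zero =>
    intro S Q dp q hrep hSnd hSg hq hQnd hQS hclo hm
    have hq0 : q = [] := List.eq_nil_of_length_eq_zero (by omega)
    subst hq0
    have hQ0 : Q = [] := by
      cases Q with
      | nil => rfl
      | cons a t => simp at hq
    subst hQ0
    rw [dpLoop_zero]
    exact ⟨S, hrep, hSnd, hSg, fun l hl => hl, fun l hl => hclo l hl (by simp)⟩
  | succ fuel ih =>
    intro S Q dp q hrep hSnd hSg hq hQnd hQS hclo hm
    cases q with
    | nil =>
      have hQ0 : Q = [] := by
        cases Q with
        | nil => rfl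
        | cons a t => simp at hq
      subst hQ0
      rw [dpLoop_nil]
      exact ⟨S, hrep, hSnd, hSg, fun l hl => hl, fun l hl => hclo l hl (by simp)⟩
    | cons e rest =>
      cases Q with
      | nil => simp at hq
      | cons l0 Q' =>
        simp only [List.map_cons, List.cons.injEq] at hq
        obtain ⟨he, hrest⟩ := hq
        have hl0S : l0 ∈ S := hQS l0 (by simp)
        obtain ⟨hch0, hfe0⟩ := hSg l0 hl0S
        subst he
        have hee : entryOfC sd wv l0 = (lastC l0, maskI l0, valC sd wv l0) := rfl
        rw [hee, dpLoop_cons]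
        have hcksnd : cks.Nodup := hck.imp (fun h => ne_of_lt h)
        obtain ⟨f1, f2⟩ := fold_step (sd := sd) hrg hch0 cks (fun c hc => hc) hcksnd S dp []
          hrep hSnd (fun l hl => (hSg l hl).1)
        set E := extsL wv S l0 cks with hE
        -- facts about the appended extensions
        have hEprop : ∀ l ∈ E, (IsChainC cks l ∧ FE wv l) ∧ l ∉ S := by
          intro l hl
          obtain ⟨c, hc, rfl, hlt, hv, hnotin⟩ := extsL_spec wv S l0 cks hl
          exact ⟨⟨chainC_snoc hch0 hc hlt, (FE_snoc_iff wv l0 hch0.1 c).mpr ⟨hfe0, hv⟩⟩, hnotin⟩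
        have hEnd : E.Nodup := extsL_nodup wv S l0 hcksnd
        have hS2nd : (S ++ E).Nodup := by
          rw [List.nodup_append]
          refine ⟨hSnd, hEnd, ?_⟩
          intro a ha b hb hab
          exact (hEprop b hb).2 (hab ▸ ha)
        have hS2g : ∀ l ∈ S ++ E, IsChainC cks l ∧ FE wv l := by
          intro l hl
          rcases List.mem_append.mp hl with hl | hl
          · exact hSg l hl
          · exact (hEprop l hl).1
        have hS2card : (S ++ E).length ≤ 2 ^ cks.length :=
          chains_card_le hck hS2nd (fun l hl => (hS2g l hl).1)
        have hQ'S2 : ∀ l ∈ Q' ++ E, l ∈ S ++ E := by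
          intro l hl
          rcases List.mem_append.mp hl with hl | hl
          · exact List.mem_append_left _ (hQS l (by simp [hl]))
          · exact List.mem_append_right _ hl
        have hQ'nd : (Q' ++ E).Nodup := by
          rw [List.nodup_append]
          refine ⟨(List.nodup_cons.mp hQnd).2, hEnd, ?_⟩
          intro a ha b hb hab
          exact (hEprop b hb).2 (hab ▸ (hQS a (by simp [ha])))
        have hq2 : rest ++ E.map (entryOfC sd wv) = (Q' ++ E).map (entryOfC sd wv) := by
          rw [List.map_append, hrest]
        have hl0notQ' : l0 ∉ Q' := (List.nodup_cons.mp hQnd).1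
        have hclo2 : ∀ l ∈ S ++ E, l ∉ Q' ++ E → ∀ c ∈ cks, lastC l < c →
            vlt (wv (lastC l) c) none = true → (l ++ [c]) ∈ S ++ E := by
          intro l hl hnotq c hc hlt hv
          rcases List.mem_append.mp hl with hl | hl
          · by_cases hll0 : l = l0
            · subst hll0
              by_cases hmem : (l ++ [c]) ∈ S
              · exact List.mem_append_left _ hmem
              · exact List.mem_append_right _ (extsL_complete wv S l cks hc hlt hv hmem)
            · have hlnotQ : l ∉ l0 :: Q' := by
                intro hmem
                rcases List.mem_cons.mp hmem with h | h
                · exact hll0 h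
                · exact (fun hh => hnotq (List.mem_append_left _ hh)) h
              exact List.mem_append_left _ (hclo l hl hlnotQ c hc hlt hv)
          · exact absurd (List.mem_append_right Q' hl) hnotq
        have hm2 : 2 * (2 ^ cks.length - (S ++ E).length) + (rest ++ E.map (entryOfC sd wv)).length
            ≤ fuel := by
          have h1 : S.length ≤ 2 ^ cks.length := by
            have := chains_card_le hck hSnd (fun l hl => (hSg l hl).1)
            exact this
          have hlen : (S ++ E).length = S.length + E.length := List.length_append ..
          have hrl : rest.length = Q'.length := by rw [hrest]; simp
          have hql : (rest ++ E.map (entryOfC sd wv)).length = Q'.length + E.length := by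
            simp [hrl]
          have hqlen : (entryOfC sd wv l0 :: rest).length = Q'.length + 1 := by simp [hrl]
          rw [hql]
          rw [hqlen] at hm
          omega
        rw [f2]
        simp only [List.nil_append]
        obtain ⟨S', hS'⟩ := ih (S ++ E) (Q' ++ E) _ _ f1 hS2nd hS2g hq2 hQ'nd hQ'S2 hclo2 hm2
        exact ⟨S', hS'.1, hS'.2.1, hS'.2.2.1,
          fun l hl => hS'.2.2.2.1 l (List.mem_append_left _ hl), hS'.2.2.2.2⟩

-- with all singletons present and closure, every finite-edge chain is discovered
theorem all_mem_of_closed {cks : List Char} {wv : Char → Char → Option Int}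
    {S' : List (List Char)} (hclosed : ClosedS cks wv S') (hsing : ∀ c ∈ cks, [c] ∈ S') :
    ∀ l, IsChainC cks l → FE wv l → l ∈ S' := by
  intro l
  induction l using List.reverseRecOn with
  | nil => intro h; exact absurd rfl h.1
  | append_singleton t c ih =>
    intro hch hfe
    by_cases ht : t = []
    · subst ht
      exact hsing c (hch.2.2 c (by simp))
    · have hchT : IsChainC cks t := ⟨ht, hch.2.1.sublist (by simp), fun x hx => hch.2.2 x (by simp [hx])⟩
      have hfe2 := (FE_snoc_iff wv t ht c).mp hfe
      have htS := ih hchT hfe2.1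
      exact hclosed t htS c (hch.2.2 c (by simp)) (lt_of_pairwise_snoc hch.2.1 _ (last_mem ht)) hfe2.2

-- the final fold over dp's keys is the min over the discovered chains of length ≥ 3
theorem A_fold_eq {cks : List Char} (hrg : ∀ c ∈ cks, inRange c)
    {sd : Char → Option Int} {wv : Char → Char → Option Int} (dE : Char → Option Int)
    {S' : List (List Char)} {dpF : PySem.Dict (Char × Int) (Option Int)}
    (hrep : dpF.items = S'.map (itemOfC sd wv)) (hnd : S'.Nodup)
    (hch : ∀ l ∈ S', IsChainC cks l) :
    dpF.keys.foldl (fun acc st =>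
        if 3 ≤ PySem.Int.bitCount st.2 then vmin acc (vadd (dpF.getD st none) (dE st.1))
        else acc) none
      = lmin ((S'.filter (fun l => decide (3 ≤ l.length))).map
          (fun l => vadd (valC sd wv l) (dE (lastC l)))) := by
  rw [repr_keys hrep, List.foldl_map]
  have hcongr : S'.foldl (fun acc l =>
      if 3 ≤ PySem.Int.bitCount (stC l).2 then vmin acc (vadd (dpF.getD (stC l) none) (dE (stC l).1))
      else acc) none
      = S'.foldl (fun acc l =>
        if 3 ≤ l.length then vmin acc (vadd (valC sd wv l) (dE (lastC l))) else acc) none := by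
    apply PySem.List.foldl_congr_mem
    intro acc l hl
    have h1 : (stC l).2 = maskI l := rfl
    have h2 : (stC l).1 = lastC l := rfl
    have h3 : PySem.Int.bitCount (maskI l) = l.length :=
      bitCount_maskI l (goodC_of hrg (hch l hl))
    have h4 : dpF.getD (stC l) none = valC sd wv l := repr_getD_mem hrg hrep hnd hch hl none
    rw [h1, h2, h3, h4]
  rw [hcongr, PySem.List.foldl_ite_eq_foldl_filter (fun (l : List Char) => 3 ≤ l.length)
    (fun acc l => vmin acc (vadd (valC sd wv l) (dE (lastC l))))]
  rw [← List.foldl_map (f := fun l => vadd (valC sd wv l) (dE (lastC l))) (g := vmin)]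
  rfl

-- the central equality: A's whole dp phase equals B's recursion read off over all (j, k)
theorem core_final (cks : List Char) (sd : Char → Option Int) (wv : Char → Char → Option Int)
    (dE : Char → Option Int) (hck : cks.Pairwise (· < ·)) (hrg : ∀ c ∈ cks, inRange c) :
    ((dpLoop cks wv (2 * 2 ^ cks.length + cks.length)
        (cks.foldl (fun acc ck =>
          (acc.1.insert (ck, coinBit ck) (sd ck), acc.2 ++ [(ck, coinBit ck, sd ck)]))
          (PySem.Dict.empty, [])).1
        (cks.foldl (fun acc ck =>
          (acc.1.insert (ck, coinBit ck) (sd ck), acc.2 ++ [(ck, coinBit ck, sd ck)]))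
          (PySem.Dict.empty, [])).2).keys.foldl (fun acc st =>
            if 3 ≤ PySem.Int.bitCount st.2 then vmin acc (vadd ((dpLoop cks wv
              (2 * 2 ^ cks.length + cks.length)
              (cks.foldl (fun acc ck =>
                (acc.1.insert (ck, coinBit ck) (sd ck), acc.2 ++ [(ck, coinBit ck, sd ck)]))
                (PySem.Dict.empty, [])).1
              (cks.foldl (fun acc ck =>
                (acc.1.insert (ck, coinBit ck) (sd ck), acc.2 ++ [(ck, coinBit ck, sd ck)]))
                (PySem.Dict.empty, [])).2).getD st none) (dE st.1))
            else acc) none)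
      = lmin ((List.range cks.length).flatMap (fun j =>
          (List.range' 3 (cks.length - 2)).map (fun k =>
            vadd (bestB cks sd wv j k) (dE (cks.getD j ' '))))) := by
  have hcksnd : cks.Nodup := hck.imp (fun h => ne_of_lt h)
  -- the seed fold builds the singleton states
  have hsplit : (cks.foldl (fun acc ck =>
      (acc.1.insert (ck, coinBit ck) (sd ck), acc.2 ++ [(ck, coinBit ck, sd ck)]))
      ((PySem.Dict.empty : PySem.Dict (Char × Int) (Option Int)),
        ([] : List (Char × Int × Option Int))))
      = (cks.foldl (fun d ck => d.insert (ck, coinBit ck) (sd ck)) PySem.Dict.empty,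
         cks.foldl (fun q ck => q ++ [(ck, coinBit ck, sd ck)]) []) := by
    exact PySem.List.foldl_prod_mk (f := fun d ck => d.insert (ck, coinBit ck) (sd ck))
      (g := fun q ck => q ++ [(ck, coinBit ck, sd ck)]) cks PySem.Dict.empty []
  rw [hsplit]
  have hitem_single : ∀ c ∈ cks, itemOfC sd wv [c] = ((c, coinBit c), sd c) := by
    intro c hc
    unfold itemOfC stC
    rw [coinBit_eq (hrg c hc)]
    have : maskI [c] = ((2 ^ posC c : Nat) : Int) := by
      unfold maskI maskN
      simp
    rw [this]
    rfl
  have hentry_single : ∀ c ∈ cks, entryOfC sd wv [c] = (c, coinBit c, sd c) := by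
    intro c hc
    unfold entryOfC
    rw [coinBit_eq (hrg c hc)]
    have : maskI [c] = ((2 ^ posC c : Nat) : Int) := by
      unfold maskI maskN
      simp
    rw [this]
    rfl
  have hdp0 : (cks.foldl (fun d ck => d.insert (ck, coinBit ck) (sd ck))
      (PySem.Dict.empty : PySem.Dict (Char × Int) (Option Int))).items
      = (cks.map (fun c => [c])).map (itemOfC sd wv) := by
    rw [PySem.Dict.items_foldl_insert_fresh cks (fun ck => (ck, coinBit ck)) sd _
      (fun a _ => PySem.Dict.contains_empty _)
      (hcksnd.map_on (fun x _ y _ h => congrArg Prod.fst h))]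
    rw [List.map_map]
    have hempty : (PySem.Dict.empty : PySem.Dict (Char × Int) (Option Int)).items = [] := rfl
    rw [hempty, List.nil_append]
    apply List.map_congr_left
    intro c hc
    exact (hitem_single c hc).symm
  have hq0 : cks.foldl (fun q ck => q ++ [(ck, coinBit ck, sd ck)])
      ([] : List (Char × Int × Option Int))
      = (cks.map (fun c => [c])).map (entryOfC sd wv) := by
    rw [PySem.List.foldl_append_singleton_eq_map, List.map_map]
    simp only [List.nil_append]
    apply List.map_congr_left
    intro c hc
    exact (hentry_single c hc).symm
  have hS0nd : (cks.map (fun c => [c])).Nodup :=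
    hcksnd.map_on (fun x _ y _ h => by simpa using h)
  have hS0g : ∀ l ∈ cks.map (fun c => [c]), IsChainC cks l ∧ FE wv l := by
    intro l hl
    obtain ⟨c, hc, rfl⟩ := List.mem_map.mp hl
    exact ⟨⟨by simp, by simp, by simpa using hc⟩, by intro p hp; simp [edgesC] at hp⟩
  have hmeas : 2 * (2 ^ cks.length - (cks.map (fun c => [c])).length)
      + (cks.foldl (fun q ck => q ++ [(ck, coinBit ck, sd ck)])
          ([] : List (Char × Int × Option Int))).length
      ≤ 2 * 2 ^ cks.length + cks.length := by
    rw [hq0]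
    simp only [List.length_map]
    omega
  obtain ⟨S', hS'rep, hS'nd, hS'g, hS0sub, hS'cl⟩ := dpLoop_spec hck hrg
    (2 * 2 ^ cks.length + cks.length) (cks.map (fun c => [c])) (cks.map (fun c => [c])) _ _
    hdp0 hS0nd hS0g hq0 hS0nd (fun l hl => hl)
    (fun l hl hnot => absurd hl hnot) hmeas
  rw [A_fold_eq hrg dE hS'rep hS'nd (fun l hl => (hS'g l hl).1)]
  -- both sides are the min over the same set of chain candidates
  apply lmin_eq_of_dominates
  · -- an A candidate (a finite-edge chain of length ≥ 3) is matched through bestB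
    intro x hx hxfin
    simp only [List.mem_map, List.mem_filter, decide_eq_true_eq] at hx
    obtain ⟨l, ⟨hlS, hlen3⟩, rfl⟩ := hx
    obtain ⟨hch, -⟩ := hS'g l hlS
    obtain ⟨j, hj, hcj, hmemE⟩ := chainsE_complete hck l hch.1 hch.2.1 hch.2.2
    refine ⟨vadd (bestB cks sd wv j l.length) (dE (cks.getD j ' ')), ?_, ?_⟩
    · apply List.mem_flatMap.mpr
      refine ⟨j, List.mem_range.mpr hj, ?_⟩
      apply List.mem_map.mpr
      refine ⟨l.length, ?_, rfl⟩
      apply List.mem_range'_1.mpr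
      have hle : l.length ≤ cks.length := (chain_sublist hck hch).length_le
      omega
    · rw [hcj]
      rw [toW_vadd, toW_vadd]
      apply add_le_add _ le_rfl
      rw [bestB_spec cks sd wv hck l.length (by omega) j hj]
      exact lmin_le_mem (List.mem_map.mpr ⟨l, hmemE, rfl⟩)
  · -- a finite B candidate comes from a realized finite-edge chain, present in S'
    intro y hy hyfin
    simp only [List.mem_flatMap, List.mem_map, List.mem_range] at hy
    obtain ⟨j, hj, k, hk, rfl⟩ := hy
    have hk' := List.mem_range'_1.mp hk
    have hb := bestB_spec cks sd wv hck k (by omega) j hj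
    rw [hb] at hyfin ⊢
    have hne : lmin ((chainsE cks j k).map (valC sd wv)) ≠ none := by
      intro h0
      rw [h0] at hyfin
      simp [vadd, toW] at hyfin
    rcases lmin_mem_or_top ((chainsE cks j k).map (valC sd wv)) with h | h
    · exact absurd h hne
    · obtain ⟨l, hl, hval⟩ := List.mem_map.mp h
      obtain ⟨hlne, hpw, hmem, hlen, hlast⟩ := chainsE_sound hck k j hj l hl
      have hchain : IsChainC cks l := ⟨hlne, hpw, hmem⟩
      have hfe : FE wv l := FE_of_valC_ne_none (by rw [hval]; exact hne)
      have hlS' : l ∈ S' := all_mem_of_closed hS'cl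
        (fun c hc => hS0sub [c] (List.mem_map.mpr ⟨c, hc, rfl⟩)) l hchain hfe
      refine ⟨vadd (valC sd wv l) (dE (lastC l)), ?_, ?_⟩
      · apply List.mem_map.mpr
        refine ⟨l, List.mem_filter.mpr ⟨hlS', by simpa using hlen ▸ hk'.1⟩, rfl⟩
      · rw [hval, hlast]

/- ---------- glue: the points dictionary and the precondition ---------- -/

-- the inner points loop over j
theorem keys_points_inner (grid : List String) (i : Int) :
    ∀ (js : List Int) (pts : PySem.Dict Char (Int × Int)),
      (∀ c, c ∈ (js.foldl (fun pts j =>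
          match cellC grid i j with
          | some c => if c = 'S' ∨ c = 'E' ∨ PySem.Chars.isdigit c then pts.insert c (i, j) else pts
          | none => pts) pts).keys
        ↔ c ∈ pts.keys ∨ ∃ j ∈ js, cellC grid i j = some c ∧
            (c = 'S' ∨ c = 'E' ∨ PySem.Chars.isdigit c))
      ∧ (pts.keys.Nodup → (js.foldl (fun pts j =>
          match cellC grid i j with
          | some c => if c = 'S' ∨ c = 'E' ∨ PySem.Chars.isdigit c then pts.insert c (i, j) else pts
          | none => pts) pts).keys.Nodup) := by
  intro js
  induction js with
  | nil => intro pts; simp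
  | cons j js' ih =>
    intro pts
    rw [List.foldl_cons]
    rcases hcell : cellC grid i j with _ | c0
    · simp only [hcell]
      constructor
      · intro c
        rw [(ih pts).1 c]
        simp [hcell]
      · exact (ih pts).2
    · simp only [hcell]
      by_cases hok : c0 = 'S' ∨ c0 = 'E' ∨ PySem.Chars.isdigit c0
      · rw [if_pos hok]
        constructor
        · intro c
          rw [(ih _).1 c]
          rw [PySem.Dict.mem_keys_insert]
          constructor
          · intro h
            rcases h with (rfl | h) | h
            · exact Or.inr ⟨j, by simp, hcell, hok⟩
            · exact Or.inl h
            · obtain ⟨j', hj', hc', hcond⟩ := h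
              exact Or.inr ⟨j', by simp [hj'], hc', hcond⟩
          · intro h
            rcases h with h | ⟨j', hj', hc', hcond⟩
            · exact Or.inl (Or.inr h)
            · rcases List.mem_cons.mp hj' with rfl | hj'
              · rw [hcell] at hc'
                injection hc' with hc'
                subst hc'
                exact Or.inl (Or.inl rfl)
              · exact Or.inr ⟨j', hj', hc', hcond⟩
        · intro hnd
          exact (ih _).2 (PySem.Dict.nodup_keys_insert _ _ _ hnd)
      · rw [if_neg hok]
        constructor
        · intro c
          rw [(ih pts).1 c]
          constructor
          · intro h
            rcases h with h | ⟨j', hj', hc', hcond⟩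
            · exact Or.inl h
            · exact Or.inr ⟨j', by simp [hj'], hc', hcond⟩
          · intro h
            rcases h with h | ⟨j', hj', hc', hcond⟩
            · exact Or.inl h
            · rcases List.mem_cons.mp hj' with rfl | hj'
              · rw [hcell] at hc'
                injection hc' with hc'
                subst hc'
                exact absurd hcond hok
              · exact Or.inr ⟨j', hj', hc', hcond⟩
        · exact (ih pts).2

theorem keys_points_outer (grid : List String) (n : Int) :
    ∀ (is : List Int) (pts : PySem.Dict Char (Int × Int)),
      (∀ c, c ∈ (is.foldl (fun pts i => (PySem.List.pyRange 0 n 1).foldl (fun pts j =>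
          match cellC grid i j with
          | some c => if c = 'S' ∨ c = 'E' ∨ PySem.Chars.isdigit c then pts.insert c (i, j) else pts
          | none => pts) pts) pts).keys
        ↔ c ∈ pts.keys ∨ ∃ i ∈ is, ∃ j ∈ PySem.List.pyRange 0 n 1, cellC grid i j = some c ∧
            (c = 'S' ∨ c = 'E' ∨ PySem.Chars.isdigit c))
      ∧ (pts.keys.Nodup → (is.foldl (fun pts i => (PySem.List.pyRange 0 n 1).foldl (fun pts j =>
          match cellC grid i j with
          | some c => if c = 'S' ∨ c = 'E' ∨ PySem.Chars.isdigit c then pts.insert c (i, j) else pts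
          | none => pts) pts) pts).keys.Nodup) := by
  intro is
  induction is with
  | nil => intro pts; simp
  | cons i is' ih =>
    intro pts
    rw [List.foldl_cons]
    constructor
    · intro c
      rw [(ih _).1 c, (keys_points_inner grid i (PySem.List.pyRange 0 n 1) pts).1 c]
      constructor
      · intro h
        rcases h with (h | ⟨j, hj, hc, hcond⟩) | ⟨i', hi', hrest⟩
        · exact Or.inl h
        · exact Or.inr ⟨i, by simp, j, hj, hc, hcond⟩
        · exact Or.inr ⟨i', by simp [hi'], hrest⟩
      · intro h
        rcases h with h | ⟨i', hi', hrest⟩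
        · exact Or.inl (Or.inl h)
        · rcases List.mem_cons.mp hi' with rfl | hi'
          · exact Or.inl (Or.inr hrest)
          · exact Or.inr ⟨i', hi', hrest⟩
    · intro hnd
      exact (ih _).2 ((keys_points_inner grid i (PySem.List.pyRange 0 n 1) pts).2 hnd)

theorem mem_keys_pointsOf (grid : List String) (n : Int) (c : Char) :
    c ∈ (pointsOf grid n).keys ↔
      (some c ∈ winChars grid n ∧ (c = 'S' ∨ c = 'E' ∨ PySem.Chars.isdigit c)) := by
  unfold pointsOf
  rw [(keys_points_outer grid n (PySem.List.pyRange 0 n 1) PySem.Dict.empty).1 c]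
  unfold winChars
  constructor
  · intro h
    rcases h with h | ⟨i, hi, j, hj, hc, hcond⟩
    · exact absurd h (by
        have : (PySem.Dict.empty : PySem.Dict Char (Int × Int)).keys = [] := rfl
        rw [this]
        simp)
    · exact ⟨List.mem_flatMap.mpr ⟨i, hi, List.mem_map.mpr ⟨j, hj, hc⟩⟩, hcond⟩
  · intro ⟨hwin, hcond⟩
    obtain ⟨i, hi, hj⟩ := List.mem_flatMap.mp hwin
    obtain ⟨j, hj, hc⟩ := List.mem_map.mp hj
    exact Or.inr ⟨i, hi, j, hj, hc, hcond⟩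

theorem nodup_keys_pointsOf (grid : List String) (n : Int) : (pointsOf grid n).keys.Nodup := by
  unfold pointsOf
  exact (keys_points_outer grid n (PySem.List.pyRange 0 n 1) PySem.Dict.empty).2
    PySem.Dict.nodup_keys_empty

theorem inRange_of_digit {c : Char} (hd : PySem.Chars.isdigit c = true) (h0 : c ≠ '0') :
    inRange c := by
  simp only [PySem.Chars.isdigit, Bool.and_eq_true, decide_eq_true_eq] at hd
  obtain ⟨h1, h2⟩ := hd
  refine ⟨?_, h2⟩
  have hlt : '0' < c := lt_of_le_of_ne h1 (Ne.symm h0)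
  rw [Char.le_def]
  rw [Char.lt_def] at hlt
  exact hlt

-- ===== VERDICT (by name: the statement is the Claim_ definition above) =====
theorem solve_spec : Claim_equal_solve := by
  intro grid n _hdom hpre
  unfold Spec_solve
  simp only [solve, solve_alt]
  have hlen : PySem.List.len (PySem.List.sorted
      ((pointsOf grid n).keys.filter (fun c => PySem.Chars.isdigit c)) (fun c => c) false)
      = PySem.List.len ((pointsOf grid n).keys.filter (fun c => PySem.Chars.isdigit c)) := by
    rw [PySem.List.len_eq, PySem.List.len_eq, PySem.List.length_sorted]
  rw [hlen]
  split_ifs with hcond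
  · rfl
  · push_neg at hcond
    obtain ⟨hS, hE, hlen3⟩ := hcond
    have hdknd : ((pointsOf grid n).keys.filter (fun c => PySem.Chars.isdigit c)).Nodup :=
      (nodup_keys_pointsOf grid n).filter _
    have hcknd : (PySem.List.sorted ((pointsOf grid n).keys.filter
        (fun c => PySem.Chars.isdigit c)) (fun c => c) false).Nodup :=
      ((PySem.List.sorted_perm _ (fun c => c) false).symm.nodup hdknd)
    have hck : (PySem.List.sorted ((pointsOf grid n).keys.filter
        (fun c => PySem.Chars.isdigit c)) (fun c => c) false).Pairwise (· < ·) := by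
      have hle := PySem.List.sorted_pairwise ((pointsOf grid n).keys.filter
        (fun c => PySem.Chars.isdigit c)) (fun c => c)
      exact (hle.and hcknd).imp (fun h => lt_of_le_of_ne h.1 h.2)
    -- no coin '0' can be present: together with S, E and ≥ 3 digits it is excluded by Pre_solve
    have h3dk : 3 ≤ ((pointsOf grid n).keys.filter (fun c => PySem.Chars.isdigit c)).length := by
      rw [PySem.List.len_eq] at hlen3
      omega
    have h0 : ('0' : Char) ∉ (pointsOf grid n).keys := by
      intro h0mem
      apply hpre.2
      have hwin0 : some '0' ∈ winChars grid n := ((mem_keys_pointsOf grid n '0').mp h0mem).1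
      have hSmem : 'S' ∈ (pointsOf grid n).keys :=
        (PySem.Dict.contains_iff_mem_keys _ _).mp hS
      have hEmem : 'E' ∈ (pointsOf grid n).keys :=
        (PySem.Dict.contains_iff_mem_keys _ _).mp hE
      refine ⟨hwin0, ((mem_keys_pointsOf grid n 'S').mp hSmem).1,
        ((mem_keys_pointsOf grid n 'E').mp hEmem).1, ?_⟩
      have hsub : ((pointsOf grid n).keys.filter (fun c => PySem.Chars.isdigit c))
          ⊆ PySem.Set.ofList (((winChars grid n).filterMap id).filter
              (fun c => PySem.Chars.isdigit c)) := by
        intro d hd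
        have hdig : PySem.Chars.isdigit d = true := List.of_mem_filter hd
        have hdkey : d ∈ (pointsOf grid n).keys := List.mem_of_mem_filter hd
        have hdwin : some d ∈ winChars grid n := ((mem_keys_pointsOf grid n d).mp hdkey).1
        apply (PySem.Set.mem_ofList _ _).mpr
        apply List.mem_filter.mpr
        refine ⟨?_, hdig⟩
        exact List.mem_filterMap.mpr ⟨some d, hdwin, rfl⟩
      calc (3 : Nat) ≤ _ := h3dk
      _ ≤ _ := nodup_length_le hdknd hsub
    have hrg : ∀ c ∈ PySem.List.sorted ((pointsOf grid n).keys.filter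
        (fun c => PySem.Chars.isdigit c)) (fun c => c) false, inRange c := by
      intro c hc
      have hc' : c ∈ (pointsOf grid n).keys.filter (fun c => PySem.Chars.isdigit c) :=
        (PySem.List.mem_sorted _ _ _ _).mp hc
      have hdig : PySem.Chars.isdigit c = true := List.of_mem_filter hc'
      have hkey : c ∈ (pointsOf grid n).keys := List.mem_of_mem_filter hc'
      have hne0 : c ≠ '0' := by
        intro h
        subst h
        exact h0 hkey
      exact inRange_of_digit hdig hne0
    exact congrArg (fun v : Option Int => v.getD (-1))
      (core_final _
        (fun ck => mget ((distsOf grid n (pointsOf grid n)).getD 'S' [])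
          ((pointsOf grid n).getD ck (0, 0)).1 ((pointsOf grid n).getD ck (0, 0)).2)
        (fun a b => mget ((distsOf grid n (pointsOf grid n)).getD a [])
          ((pointsOf grid n).getD b (0, 0)).1 ((pointsOf grid n).getD b (0, 0)).2)
        (fun c => mget ((distsOf grid n (pointsOf grid n)).getD c [])
          ((pointsOf grid n).getD 'E' (0, 0)).1 ((pointsOf grid n).getD 'E' (0, 0)).2)
        hck hrg)
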